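-- pv_equiv track=rewrite | github.com/kilian-group/phantom-wiki | CFG_utils.py | one_line_cfg
-- ===== SOURCE A (Python) =====
-- def one_line_cfg(cfg):
--     lines = cfg.strip().split("\n")
--     current_rule = None
--     one_line_cfg = []
--
--     for line in lines:
--         line = line.strip()
--
--         # If the line starts with a non-terminal followed by '->', it's a new rule
--         if "->" in line:
--             if current_rule:
--                 # Append the previous rule to the result before starting a new one
--                 one_line_cfg.append(current_rule)
--             current_rule = line
--         else:
--             # If it's a continuation of the previous rule, append it to the same line
--             current_rule += " " + line
--
--     # Append the last rule
--     if current_rule: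
--         one_line_cfg.append(current_rule)
--
--     return "\n".join(one_line_cfg)
-- ===== SOURCE B (Python) =====
-- def one_line_cfg(cfg):
--     # Recursive, back-to-front: the start of the LAST rule is the greatest index
--     # of a line containing '->'; that slice [s:] is one rule (joined by spaces),
--     # and the prefix [:s] is a smaller CFG handled recursively.
--     def go(lines):
--         if not lines:
--             return []
--         s = max(i for i, l in enumerate(lines) if "->" in l)
--         return go(lines[:s]) + [" ".join(lines[s:])]
--     return "\n".join(go([l.strip() for l in cfg.strip().split("\n")]))
-- ===== Notes on version B (the rewrite author's own statement) =====
-- stated objective: alternative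
-- what changed: B replaces A's forward accumulator-with-flush loop by a back-to-front recursion: it finds the start of the LAST rule as the greatest index of a line containing '->', space-joins that slice as one rule and recurses on the prefix.
import Mathlib
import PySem

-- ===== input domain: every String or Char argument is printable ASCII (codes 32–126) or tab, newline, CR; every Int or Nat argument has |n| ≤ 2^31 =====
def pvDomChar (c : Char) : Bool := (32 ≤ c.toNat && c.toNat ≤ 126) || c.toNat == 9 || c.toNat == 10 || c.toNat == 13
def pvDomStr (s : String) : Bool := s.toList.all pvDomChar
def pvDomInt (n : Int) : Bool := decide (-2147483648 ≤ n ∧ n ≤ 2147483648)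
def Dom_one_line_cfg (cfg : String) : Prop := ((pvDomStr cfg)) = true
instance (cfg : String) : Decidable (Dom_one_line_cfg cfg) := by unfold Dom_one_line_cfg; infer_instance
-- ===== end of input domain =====

-- B collapses multi-line CFG rules recursively and back-to-front: it slices off the
-- LAST rule (greatest index of a '->' line) and recurses on the prefix, instead of
-- A's forward accumulator with flush logic; return value only, no side effects.

-- ===== PORT A =====
-- A's loop state: (current_rule : Option String — None before the first '->' line,
--                  one_line_cfg : List String   — the finished rules).
-- Python's `if current_rule:` is truthiness: not None AND not "".
def pvStepA (st : Option String × List String) (line : String) : Option String × List String :=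
  let l := PySem.Str.strip line
  if PySem.Str.isIn "->" l then
    (some l, match st.1 with
             | some r => if r = "" then st.2 else st.2 ++ [r]
             | none   => st.2)
  else
    -- Python raises TypeError when st.1 = none (continuation line before any rule);
    -- that input is excluded by Pre_one_line_cfg, the port leaves the state unchanged there.
    (match st.1 with
     | some r => some (r ++ " " ++ l)
     | none   => none,
     st.2)

def pvFlushA (st : Option String × List String) : List String :=
  match st.1 with
  | some r => if r = "" then st.2 else st.2 ++ [r]
  | none   => st.2

def one_line_cfg (cfg : String) : String :=
  -- cfg.strip().split("\n"): the separator is the nonempty literal "\n", so split? is `some`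
  let lines := (PySem.Str.split? (PySem.Str.strip cfg) "\n").getD []
  PySem.Str.join "\n" (pvFlushA (lines.foldl pvStepA (none, [])))

-- ===== PORT B =====
-- [i for i, l in enumerate(lines) if "->" in l]
def pvRuleIdxs (lines : List String) : List Int :=
  (PySem.List.enumerate lines).filterMap (fun p => if PySem.Str.isIn "->" p.2 then some p.1 else none)

-- termination of pvGo: a rule index is a valid (nonnegative, in-range) index
lemma pvRuleIdxs_mem_iff (L : List String) (s : Int) :
    s ∈ pvRuleIdxs L ↔ ∃ (k : Nat) (h : k < L.length), s = (k : Int) ∧ PySem.Str.isIn "->" L[k] = true := by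
  unfold pvRuleIdxs
  constructor
  · intro h
    obtain ⟨p, hp, hf⟩ := List.mem_filterMap.1 h
    obtain ⟨k, hk, rfl⟩ := (PySem.List.mem_enumerate_iff L 0 p).1 hp
    by_cases hr : PySem.Str.isIn "->" L[k] = true
    · rw [if_pos hr] at hf
      exact ⟨k, hk, by have := Option.some.inj hf; omega, hr⟩
    · rw [if_neg hr] at hf
      exact absurd hf (by simp)
  · rintro ⟨k, hk, rfl, hr⟩
    refine List.mem_filterMap.2 ⟨((k : Int), L[k]), ?_, by rw [if_pos hr]⟩
    exact (PySem.List.mem_enumerate_iff L 0 _).2 ⟨k, hk, by simp⟩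

lemma pvRuleIdxs_bounds {L : List String} {s : Int} (h : s ∈ pvRuleIdxs L) :
    0 ≤ s ∧ s.toNat < L.length := by
  obtain ⟨k, hk, rfl, -⟩ := (pvRuleIdxs_mem_iff L s).1 h
  omega

-- go(lines): slice off the LAST rule (greatest '->' index), recurse on the prefix
def pvGo (lines : List String) : List String :=
  if lines = [] then []
  else
    match hm : PySem.List.max? (pvRuleIdxs lines) id with
    | none => []  -- Python: max() on an empty generator raises ValueError; excluded by Pre_one_line_cfg
    | some s =>
      pvGo (PySem.List.slice lines none (some s)) ++
        [PySem.Str.join " " (PySem.List.slice lines (some s) none)]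
termination_by lines.length
decreasing_by
  have hb := pvRuleIdxs_bounds (PySem.List.max?_mem hm)
  rw [PySem.List.slice_to lines hb.1]
  simp only [List.length_take]
  omega

def one_line_cfg_alt (cfg : String) : String :=
  PySem.Str.join "\n"
    (pvGo (((PySem.Str.split? (PySem.Str.strip cfg) "\n").getD []).map PySem.Str.strip))

-- ===== PRECONDITION & SPEC =====
-- Pre_ excludes exactly the inputs on which A raises TypeError (None + str): those whose
-- first line, after stripping, contains no "->" (B raises ValueError from max() there).
def Pre_one_line_cfg (cfg : String) : Prop :=
  PySem.Str.isIn "->"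
    (PySem.Str.strip (((PySem.Str.split? (PySem.Str.strip cfg) "\n").getD []).headD "")) = true
instance (cfg : String) : Decidable (Pre_one_line_cfg cfg) := by unfold Pre_one_line_cfg; infer_instance

def pvWitness_one_line_cfg : String := "S -> NP VP\n  | aux NP\nNP -> det N"

def Spec_one_line_cfg (cfg : String) (out : String) : Prop := out = one_line_cfg_alt cfg
instance (cfg : String) (out : String) : Decidable (Spec_one_line_cfg cfg out) := by unfold Spec_one_line_cfg; infer_instance

-- ===== CLAIM (what is proved, stated in full; the proofs are below) =====
def Claim_equal_one_line_cfg : Prop := ∀ (cfg : String), Dom_one_line_cfg cfg → Pre_one_line_cfg cfg → Spec_one_line_cfg cfg (one_line_cfg cfg)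

-- ===== LEMMAS AND PROOFS =====

-- the separator B's characterisation puts before a line: "\n" before a rule, " " before a continuation
def pvSep (l : String) : String := if PySem.Str.isIn "->" l then "\n" else " "

lemma pvJoin_single (sep l : String) : PySem.Str.join sep [l] = l := by
  rw [← String.toList_inj]
  simp [PySem.Str.toList_join, PySem.Chars.join_singleton]

lemma pvJoin_cons (sep x : String) (xs : List String) (hxs : xs ≠ []) :
    PySem.Str.join sep (x :: xs) = x ++ sep ++ PySem.Str.join sep xs := by
  obtain ⟨b, r, rfl⟩ := List.exists_cons_of_ne_nil hxs
  rw [← String.toList_inj]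
  simp [PySem.Str.toList_join, PySem.Chars.join_cons_cons]

-- join sep (acc ++ [l]) = join sep acc ++ sep ++ l  for nonempty acc
lemma pvJoin_append_singleton (sep : String) (acc : List String) (l : String) (h : acc ≠ []) :
    PySem.Str.join sep (acc ++ [l]) = PySem.Str.join sep acc ++ sep ++ l := by
  induction acc with
  | nil => exact absurd rfl h
  | cons a t ih =>
    cases t with
    | nil => simp [pvJoin_cons sep a [l] (by simp), pvJoin_single]
    | cons b r =>
      rw [List.cons_append, pvJoin_cons sep a ((b :: r) ++ [l]) (by simp),
        pvJoin_cons sep a (b :: r) (by simp), ih (by simp)]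
      rw [← String.toList_inj]; simp

-- appending to the LAST element distributes out of the join
lemma pvJoin_append_last (sep : String) (acc : List String) (x y : String) :
    PySem.Str.join sep (acc ++ [x ++ y]) = PySem.Str.join sep (acc ++ [x]) ++ y := by
  cases acc with
  | nil => simp [pvJoin_single]
  | cons a t =>
    rw [pvJoin_append_singleton sep (a :: t) _ (by simp),
      pvJoin_append_singleton sep (a :: t) _ (by simp)]
    rw [← String.toList_inj]; simp

lemma pvJoinE_cons (x : String) (xs : List String) :
    PySem.Str.join "" (x :: xs) = x ++ PySem.Str.join "" xs := by
  cases xs with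
  | nil =>
    rw [pvJoin_single, ← String.toList_inj]
    simp [PySem.Str.toList_join, PySem.Chars.join_nil]
  | cons b r =>
    rw [pvJoin_cons "" x (b :: r) (by simp), ← String.toList_inj]; simp

lemma pvJoinE_append (xs ys : List String) :
    PySem.Str.join "" (xs ++ ys) = PySem.Str.join "" xs ++ PySem.Str.join "" ys := by
  induction xs with
  | nil =>
    rw [← String.toList_inj]
    simp [PySem.Str.toList_join, PySem.Chars.join_nil]
  | cons a t ih =>
    rw [List.cons_append, pvJoinE_cons, pvJoinE_cons, ih, ← String.toList_inj]
    simp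

lemma pvArrow_ne_empty (l : String) (h : PySem.Str.isIn "->" l = true) : l ≠ "" := by
  rintro rfl
  exact absurd h (by decide)

lemma pvAppend_space_ne_empty (r l : String) : r ++ " " ++ l ≠ "" := by
  intro h
  have := congrArg String.toList h
  simp [String.toList_append] at this

-- A-side invariant: after processing `rest` from state (some r, acc), A's joined result is
-- "join of acc++[r]" followed by the per-line separator concatenation over `rest`
lemma pvMain (rest : List String) : ∀ (acc : List String) (r : String), r ≠ "" →
    PySem.Str.join "\n" (pvFlushA (rest.foldl pvStepA (some r, acc))) =
      PySem.Str.join "\n" (acc ++ [r]) ++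
        PySem.Str.join "" ((rest.map PySem.Str.strip).map (fun l => pvSep l ++ l)) := by
  induction rest with
  | nil =>
    intro acc r hr
    simp only [List.foldl_nil, pvFlushA, List.map_nil, hr, if_false]
    rw [← String.toList_inj]
    simp [PySem.Str.toList_join, PySem.Chars.join_nil]
  | cons line rest ih =>
    intro acc r hr
    simp only [List.foldl_cons, pvStepA, List.map_cons]
    by_cases harr : PySem.Str.isIn "->" (PySem.Str.strip line) = true
    · simp only [harr, if_pos, hr, if_false]
      rw [ih (acc ++ [r]) _ (pvArrow_ne_empty _ harr),
        pvJoin_append_singleton "\n" (acc ++ [r]) _ (by simp),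
        pvJoinE_cons, pvSep, if_pos harr]
      rw [← String.toList_inj]; simp
    · simp only [harr, Bool.false_eq_true, if_neg, not_false_iff]
      rw [ih acc _ (pvAppend_space_ne_empty r _)]
      have : r ++ " " ++ PySem.Str.strip line = r ++ (" " ++ PySem.Str.strip line) := by
        rw [← String.toList_inj]; simp
      rw [this, pvJoin_append_last, pvJoinE_cons, pvSep, if_neg harr]
      rw [← String.toList_inj]; simp

-- one rule: join " " over a rule line and its continuations is the separator formula
lemma pvJoinSpace (rest : List String) : ∀ (m0 : String),
    (∀ l ∈ rest, PySem.Str.isIn "->" l = false) →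
    PySem.Str.join " " (m0 :: rest) =
      m0 ++ PySem.Str.join "" (rest.map (fun l => pvSep l ++ l)) := by
  induction rest with
  | nil =>
    intro m0 _
    rw [pvJoin_single, ← String.toList_inj]
    simp [PySem.Str.toList_join, PySem.Chars.join_nil]
  | cons b r ih =>
    intro m0 h
    have hb := h b (by simp)
    rw [pvJoin_cons " " m0 (b :: r) (by simp), ih b (fun l hl => h l (by simp [hl])),
      List.map_cons, pvJoinE_cons, pvSep, if_neg (fun hc => by rw [hb] at hc; exact Bool.noConfusion hc)]
    rw [← String.toList_inj]; simp

lemma pvGo_ne_nil (m0 : String) (rest : List String)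
    (h : PySem.Str.isIn "->" m0 = true) : pvGo (m0 :: rest) ≠ [] := by
  have h0 : (0 : Int) ∈ pvRuleIdxs (m0 :: rest) :=
    (pvRuleIdxs_mem_iff _ _).2 ⟨0, by simp, by simp, by simpa using h⟩
  rw [pvGo]
  simp only [if_neg (List.cons_ne_nil m0 rest)]
  split
  · next hm => exact absurd ((PySem.List.max?_eq_none_iff _ _).1 hm ▸ h0) (List.not_mem_nil)
  · simp

-- B-side characterisation: pvGo on a list headed by a rule line yields the same
-- per-line separator formula
lemma pvGoFormula : ∀ (n : Nat) (M : List String), M.length ≤ n →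
    ∀ (m0 : String) (rest : List String), M = m0 :: rest →
    PySem.Str.isIn "->" m0 = true →
    PySem.Str.join "\n" (pvGo M) =
      m0 ++ PySem.Str.join "" (rest.map (fun l => pvSep l ++ l)) := by
  intro n
  induction n with
  | zero => intro M hM m0 rest hMe _; subst hMe; simp at hM
  | succ n ih =>
    intro M hM m0 rest hMe hm0
    subst hMe
    have h0 : (0 : Int) ∈ pvRuleIdxs (m0 :: rest) :=
      (pvRuleIdxs_mem_iff _ _).2 ⟨0, by simp, by simp, by simpa using hm0⟩
    rw [pvGo]
    simp only [if_neg (List.cons_ne_nil m0 rest)]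
    split
    · next hmx => exact absurd ((PySem.List.max?_eq_none_iff _ _).1 hmx ▸ h0) (List.not_mem_nil)
    · next s hmx =>
      have hmem := PySem.List.max?_mem hmx
      have hmax := PySem.List.max?_isMax hmx
      obtain ⟨k, hk, rfl, hrk⟩ := (pvRuleIdxs_mem_iff _ _).1 hmem
      have hnotafter : ∀ (j : Nat) (hj : j < (m0 :: rest).length), k < j →
          PySem.Str.isIn "->" (m0 :: rest)[j] = false := by
        intro j hj hkj
        by_contra hcon
        have hji : (j : Int) ∈ pvRuleIdxs (m0 :: rest) :=
          (pvRuleIdxs_mem_iff _ _).2 ⟨j, hj, rfl, by simpa using hcon⟩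
        have := hmax _ hji
        simp only [id] at this
        omega
      rw [PySem.List.slice_to _ (by omega : (0:Int) ≤ (k:Int)),
        PySem.List.slice_from _ (by omega : (0:Int) ≤ (k:Int))]
      simp only [Int.toNat_natCast]
      cases k with
      | zero =>
        -- the first line is the only rule line: one rule covering everything
        simp only [List.take_zero, List.drop_zero]
        have hnone : ∀ l ∈ rest, PySem.Str.isIn "->" l = false := by
          intro l hl
          obtain ⟨i, hi, rfl⟩ := List.mem_iff_getElem.1 hl
          exact hnotafter (i + 1) (by simpa using Nat.succ_lt_succ hi) (by omega)
        rw [show pvGo [] = [] from by rw [pvGo]; simp, List.nil_append,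
          pvJoin_single, pvJoinSpace rest m0 hnone]
      | succ u =>
        have hu : u < rest.length := by simpa using hk
        have htake : (m0 :: rest).take (u + 1) = m0 :: rest.take u := List.take_succ_cons
        have hdrop : (m0 :: rest).drop (u + 1) = rest.drop u := List.drop_succ_cons
        have hdrop2 : rest.drop u = rest[u] :: rest.drop (u + 1) :=
          List.drop_eq_getElem_cons hu
        have hrule : PySem.Str.isIn "->" rest[u] = true := by simpa using hrk
        have hnone2 : ∀ l ∈ rest.drop (u + 1), PySem.Str.isIn "->" l = false := by
          intro l hl
          obtain ⟨i, hi, rfl⟩ := List.mem_iff_getElem.1 hl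
          have hlen : u + 1 + i < rest.length := by
            have h2 : i < rest.length - (u + 1) := by simpa using hi
            omega
          rw [List.getElem_drop]
          have hj := hnotafter ((u + 1 + i) + 1) (by simp; omega) (by omega)
          simpa using hj
      -- LHS: the prefix recursion (IH) and the last rule (pvJoinSpace)
        rw [htake, hdrop, hdrop2,
          pvJoin_append_singleton "\n" _ _ (pvGo_ne_nil m0 (rest.take u) hm0),
          ih (m0 :: rest.take u) (by simp; omega) m0 (rest.take u) rfl hm0,
          pvJoinSpace (rest.drop (u + 1)) rest[u] hnone2]
      -- RHS: split rest at the last rule line and distribute the join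
        conv_rhs => rw [show rest = rest.take u ++ rest[u] :: rest.drop (u + 1) from by
          rw [← hdrop2, List.take_append_drop]]
        rw [List.map_append, List.map_cons, pvJoinE_append, pvJoinE_cons,
          pvSep, if_pos hrule]
        rw [← String.toList_inj]; simp

-- ===== VERDICT (by name: the statement is the Claim_ definition above) =====
theorem one_line_cfg_spec : Claim_equal_one_line_cfg := by
  intro cfg _ hpre
  unfold Spec_one_line_cfg one_line_cfg one_line_cfg_alt
  unfold Pre_one_line_cfg at hpre
  cases hl : (PySem.Str.split? (PySem.Str.strip cfg) "\n").getD [] with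
  | nil =>
    rw [hl] at hpre
    exact absurd hpre (by decide)
  | cons l0 rest =>
    rw [hl] at hpre
    simp only [List.headD_cons] at hpre
    simp only [List.foldl_cons, pvStepA, hpre, if_pos, List.map_cons]
    rw [pvMain rest [] _ (pvArrow_ne_empty _ hpre), List.nil_append, pvJoin_single,
      pvGoFormula (rest.length + 1) _ (by simp) (PySem.Str.strip l0) (rest.map PySem.Str.strip) rfl hpre]
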